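-- pv_equiv track=rewrite | github.com/Terry-cyx/easy-dataset-cli | easyds/core/chunks.py | compute_split_points
-- ===== SOURCE A (Python) =====
-- from typing import Any
--
-- def compute_split_points(content: str, separator: str) -> list[dict[str, Any]]:
--     """Find every occurrence of ``separator`` in ``content`` and return the
--     list of split-point dicts that ``/custom-split`` expects.
--
--     A split point is the BYTE INDEX RIGHT AFTER each separator. The chunk
--     boundary cuts at that index, so the separator stays attached to the
--     previous chunk and the next chunk starts cleanly. This matches Easy-
--     Dataset's own ``generateCustomChunks`` slicing convention (see
--     ``app/api/projects/[projectId]/custom-split/route.js``).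
--
--     Empty separators raise ``ValueError``. Returns an empty list if the
--     separator never appears (the caller should treat that as "no chunking
--     happened" and surface an error).
--     """
--     if not separator:
--         raise ValueError("separator must be a non-empty string")
--
--     points: list[dict[str, Any]] = []
--     start = 0
--     sep_len = len(separator)
--     while True:
--         idx = content.find(separator, start)
--         if idx < 0:
--             break
--         position = idx + sep_len
--         if position < len(content):
--             points.append({"position": position})
--         start = position
--     return points
-- ===== SOURCE B (Python) =====
-- from typing import Any
--
-- def compute_split_points(content: str, separator: str) -> list[dict[str, Any]]:
--     # Tokenize once with str.split, then accumulate offsets over the parts.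
--     parts = content.split(separator)  # raises ValueError on empty separator, like A
--     points: list[dict[str, Any]] = []
--     running = len(parts[0])
--     for part in parts[1:]:
--         pos = running + len(separator)
--         if pos < len(content):
--             points.append({"position": pos})
--         running = pos + len(part)
--     return points
-- ===== Notes on version B (the rewrite author's own statement) =====
-- stated objective: alternative
-- what changed: Replaces A's repeated content.find(separator, start) re-scanning loop with a single content.split(separator) tokenization followed by an offset-accumulating pass over the parts.
import Mathlib
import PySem

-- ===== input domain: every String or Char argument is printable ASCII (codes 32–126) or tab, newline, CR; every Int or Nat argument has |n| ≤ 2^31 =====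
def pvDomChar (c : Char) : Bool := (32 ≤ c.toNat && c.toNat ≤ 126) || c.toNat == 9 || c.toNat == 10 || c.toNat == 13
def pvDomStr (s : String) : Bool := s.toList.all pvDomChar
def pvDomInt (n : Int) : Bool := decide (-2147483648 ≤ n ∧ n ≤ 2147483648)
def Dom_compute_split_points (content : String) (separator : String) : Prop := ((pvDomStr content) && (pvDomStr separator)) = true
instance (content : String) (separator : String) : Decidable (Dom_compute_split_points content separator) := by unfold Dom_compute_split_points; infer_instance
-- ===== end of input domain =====

-- B replaces A's repeated str.find re-scanning loop by one str.split pass followed by an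
-- offset-accumulating fold over the parts (objective: alternative decomposition, same cost).

-- ===== PORT A =====
-- A's while-loop: idx = content.find(separator, start); stop on -1; record idx+len(sep) when
-- it is < len(content); continue from there. Fuel only makes the recursion total: the start
-- position strictly increases each round, so content.length + 2 steps always suffice.
def aGo (s sep : List Char) (fuel : Nat) (start : Int)
    (acc : List (List (String × Int))) : List (List (String × Int)) :=
  match fuel with
  | 0 => acc
  | fuel + 1 =>
    let idx := PySem.Chars.findFrom s sep start none
    if idx < 0 then acc
    else
      let position := idx + (sep.length : Int)
      aGo s sep fuel position
        (if position < (s.length : Int) then acc ++ [[("position", position)]] else acc)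

def compute_split_points (content : String) (separator : String) : List (List (String × Int)) :=
  if separator.toList.isEmpty then []  -- Python raises ValueError here; excluded by Pre_
  else aGo content.toList separator.toList (content.toList.length + 2) 0 []

-- ===== PORT B =====
-- loop body of Source B's for-loop over parts[1:] with state (running, points)
def bStep (seplen clen : Int) (st : Int × List (List (String × Int))) (part : List Char) :
    Int × List (List (String × Int)) :=
  let pos := st.1 + seplen
  (pos + (part.length : Int), if pos < clen then st.2 ++ [[("position", pos)]] else st.2)

def compute_split_points_alt (content : String) (separator : String) : List (List (String × Int)) :=
  match PySem.Chars.split? content.toList separator.toList with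
  | none => []          -- Python: content.split('') raises ValueError; excluded by Pre_
  | some parts =>
    match parts with
    | [] => []          -- unreachable: split never returns an empty list
    | p0 :: rest =>
      (rest.foldl (bStep (separator.toList.length : Int) (content.toList.length : Int))
        ((p0.length : Int), [])).2

-- ===== PRECONDITION & SPEC =====
-- Pre_ excludes exactly the empty separator, on which Python A raises ValueError (B raises too).
def Pre_compute_split_points (content : String) (separator : String) : Prop :=
  separator.toList ≠ []
instance (content : String) (separator : String) : Decidable (Pre_compute_split_points content separator) := by unfold Pre_compute_split_points; infer_instance

def pvWitness_compute_split_points : String × String := ("ab|cd|", "|")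

def Spec_compute_split_points (content : String) (separator : String) (out : List (List (String × Int))) : Prop := out = compute_split_points_alt content separator
instance (content : String) (separator : String) (out : List (List (String × Int))) : Decidable (Spec_compute_split_points content separator out) := by unfold Spec_compute_split_points; infer_instance

-- ===== CLAIM (what is proved, stated in full; the proofs are below) =====
def Claim_equal_compute_split_points : Prop := ∀ (content : String) (separator : String), Dom_compute_split_points content separator → Pre_compute_split_points content separator → Spec_compute_split_points content separator (compute_split_points content separator)

-- ===== LEMMAS AND PROOFS =====

-- one-step unfoldings of PySem.Chars.splitOn.go
theorem go_pre (sep : List Char) (c : Char) (rest cur : List Char) (acc : List (List Char))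
    (fuel : Nat) (h : sep.isPrefixOf (c :: rest) = true) :
    PySem.Chars.splitOn.go sep (fuel + 1) (c :: rest) cur acc =
      PySem.Chars.splitOn.go sep fuel (List.drop sep.length (c :: rest)) [] (cur.reverse :: acc) := by
  simp [PySem.Chars.splitOn.go, h]

theorem go_npre (sep : List Char) (c : Char) (rest cur : List Char) (acc : List (List Char))
    (fuel : Nat) (h : sep.isPrefixOf (c :: rest) = false) :
    PySem.Chars.splitOn.go sep (fuel + 1) (c :: rest) cur acc =
      PySem.Chars.splitOn.go sep fuel rest (c :: cur) acc := by
  simp [PySem.Chars.splitOn.go, h]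

-- Python's find(sub, k) as find(sub) shifted by k (on the scanner's accumulator)
theorem findgo_shift (sep : List Char) (hsep : sep ≠ []) :
    ∀ (l : List Char) (k : Nat),
      PySem.Chars.find.go sep l k =
        if PySem.Chars.find l sep = -1 then -1 else (k : Int) + PySem.Chars.find l sep := by
  intro l
  induction l with
  | nil => intro k; simp [PySem.Chars.find, PySem.Chars.find.go, List.isEmpty_iff, hsep]
  | cons c rest ih =>
    intro k
    by_cases h : sep.isPrefixOf (c :: rest) = true
    · simp [PySem.Chars.find, PySem.Chars.find.go, h]
    · rw [show PySem.Chars.find.go sep (c :: rest) k = PySem.Chars.find.go sep rest (k+1) by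
        simp [PySem.Chars.find.go, h]]
      rw [show PySem.Chars.find (c :: rest) sep = PySem.Chars.find.go sep rest 1 by
        simp [PySem.Chars.find, PySem.Chars.find.go, h]]
      rw [ih (k+1), ih 1]
      have h1 := PySem.Chars.neg_one_le_find rest sep
      by_cases hf : PySem.Chars.find rest sep = -1
      · simp [hf]
      · simp only [hf, if_false]
        split_ifs with h2
        · omega
        · push_cast
          ring

-- splitOn.go never yields the empty list of parts
theorem go_ne_nil (sep : List Char) :
    ∀ (fuel : Nat) (l cur : List Char) (acc : List (List Char)),
      PySem.Chars.splitOn.go sep fuel l cur acc ≠ [] := by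
  intro fuel
  induction fuel with
  | zero => intro l cur acc; simp [PySem.Chars.splitOn.go]
  | succ fuel ih =>
    intro l cur acc
    match l with
    | [] => simp [PySem.Chars.splitOn.go]
    | c :: rest =>
      by_cases h : sep.isPrefixOf (c :: rest) = true
      · rw [go_pre sep c rest cur acc fuel h]
        exact ih _ _ _
      · rw [go_npre sep c rest cur acc fuel (by revert h; cases sep.isPrefixOf (c :: rest) <;> simp)]
        exact ih _ _ _

theorem splitOn_ne_nil (sep l : List Char) : PySem.Chars.splitOn l sep ≠ [] := by
  simp only [PySem.Chars.splitOn]; exact go_ne_nil sep _ l [] []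

-- splitOn.go with arbitrary fuel/cur/acc, expressed through splitOn itself
theorem go_splitOn (sep : List Char) (hsep : sep ≠ []) :
    ∀ (n : Nat) (l cur : List Char) (acc : List (List Char)) (fuel : Nat),
      l.length < fuel → l.length ≤ n →
      PySem.Chars.splitOn.go sep fuel l cur acc =
        acc.reverse ++ (PySem.Chars.splitOn l sep).modifyHead (cur.reverse ++ ·) := by
  intro n
  induction n with
  | zero =>
    intro l cur acc fuel h1 h2
    have hl : l = [] := List.eq_nil_of_length_eq_zero (Nat.le_zero.mp h2)
    subst hl
    cases fuel with
    | zero => omega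
    | succ fuel =>
      simp [PySem.Chars.splitOn, PySem.Chars.splitOn.go]
  | succ n ih =>
    intro l cur acc fuel h1 h2
    match l with
    | [] =>
      cases fuel with
      | zero => omega
      | succ fuel => simp [PySem.Chars.splitOn, PySem.Chars.splitOn.go]
    | c :: rest =>
      have hsl : 0 < sep.length := List.length_pos_of_ne_nil hsep
      cases fuel with
      | zero => omega
      | succ fuel =>
        by_cases h : sep.isPrefixOf (c :: rest) = true
        · rw [go_pre sep c rest cur acc fuel h]
          have hlen : (List.drop sep.length (c::rest)).length ≤ n := by
            simp only [List.length_drop, List.length_cons] at h2 ⊢; omega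
          rw [ih _ [] (cur.reverse :: acc) fuel (by simp only [List.length_drop, List.length_cons] at h1 ⊢; omega) hlen]
          have hspl : PySem.Chars.splitOn (c :: rest) sep
              = [] :: PySem.Chars.splitOn (List.drop sep.length (c::rest)) sep := by
            rw [show PySem.Chars.splitOn (c::rest) sep
                = PySem.Chars.splitOn.go sep ((c::rest).length + 1) (c::rest) [] [] by rfl]
            rw [go_pre sep c rest [] [] (c::rest).length h]
            rw [ih _ [] _ _ (by simp only [List.length_drop, List.length_cons]; omega) hlen]
            cases PySem.Chars.splitOn (List.drop sep.length (c::rest)) sep <;> simp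
          rw [hspl]
          cases PySem.Chars.splitOn (List.drop sep.length (c::rest)) sep <;> simp
        · have h' : sep.isPrefixOf (c :: rest) = false := by
            revert h; cases sep.isPrefixOf (c :: rest) <;> simp
          rw [go_npre sep c rest cur acc fuel h']
          rw [ih rest (c :: cur) acc fuel (by simp at *; omega) (by simp at h2 ⊢; omega)]
          have hspl : PySem.Chars.splitOn (c :: rest) sep
              = (PySem.Chars.splitOn rest sep).modifyHead (c :: ·) := by
            rw [show PySem.Chars.splitOn (c::rest) sep
                = PySem.Chars.splitOn.go sep ((c::rest).length + 1) (c::rest) [] [] by rfl]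
            rw [go_npre sep c rest [] [] (c::rest).length h']
            rw [ih rest [c] [] _ (by simp) (by simp at h2 ⊢; omega)]
            cases PySem.Chars.splitOn rest sep <;> simp
          rw [hspl]
          cases hr : PySem.Chars.splitOn rest sep with
          | nil => simp
          | cons p ps => simp

theorem splitOn_cons_pre (sep : List Char) (hsep : sep ≠ []) (c : Char) (rest : List Char)
    (h : sep.isPrefixOf (c :: rest) = true) :
    PySem.Chars.splitOn (c :: rest) sep
      = [] :: PySem.Chars.splitOn (List.drop sep.length (c :: rest)) sep := by
  have hsl : 0 < sep.length := List.length_pos_of_ne_nil hsep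
  rw [show PySem.Chars.splitOn (c::rest) sep
      = PySem.Chars.splitOn.go sep ((c::rest).length + 1) (c::rest) [] [] by rfl]
  rw [go_pre sep c rest [] [] (c::rest).length h]
  rw [go_splitOn sep hsep ((c::rest).length) _ [] _ _
    (by simp only [List.length_drop, List.length_cons]; omega)
    (by simp only [List.length_drop, List.length_cons]; omega)]
  cases PySem.Chars.splitOn (List.drop sep.length (c::rest)) sep <;> simp

theorem splitOn_cons_npre (sep : List Char) (hsep : sep ≠ []) (c : Char) (rest : List Char)
    (h : sep.isPrefixOf (c :: rest) = false) :
    PySem.Chars.splitOn (c :: rest) sep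
      = (PySem.Chars.splitOn rest sep).modifyHead (c :: ·) := by
  rw [show PySem.Chars.splitOn (c::rest) sep
      = PySem.Chars.splitOn.go sep ((c::rest).length + 1) (c::rest) [] [] by rfl]
  rw [go_npre sep c rest [] [] (c::rest).length h]
  rw [go_splitOn sep hsep rest.length rest [c] [] _ (by simp) (by omega)]
  cases PySem.Chars.splitOn rest sep <;> simp

-- one recursive step of Python's split, phrased through find
theorem splitOn_step (sep : List Char) (hsep : sep ≠ []) (l : List Char) :
    PySem.Chars.splitOn l sep =
      if PySem.Chars.find l sep = -1 then [l]
      else l.take (PySem.Chars.find l sep).toNat ::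
        PySem.Chars.splitOn (l.drop ((PySem.Chars.find l sep).toNat + sep.length)) sep := by
  induction l with
  | nil =>
    have hf : PySem.Chars.find [] sep = -1 := by
      simp [PySem.Chars.find, PySem.Chars.find.go, List.isEmpty_iff, hsep]
    rw [hf]
    simp [PySem.Chars.splitOn, PySem.Chars.splitOn.go]
  | cons c rest ih =>
    by_cases h : sep.isPrefixOf (c :: rest) = true
    · have hf : PySem.Chars.find (c :: rest) sep = 0 := by
        simp [PySem.Chars.find, PySem.Chars.find.go, h]
      rw [hf]
      simpa using splitOn_cons_pre sep hsep c rest h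
    · have h' : sep.isPrefixOf (c :: rest) = false := by
        revert h; cases sep.isPrefixOf (c :: rest) <;> simp
      have hf : PySem.Chars.find (c :: rest) sep
          = if PySem.Chars.find rest sep = -1 then -1 else 1 + PySem.Chars.find rest sep := by
        rw [show PySem.Chars.find (c :: rest) sep = PySem.Chars.find.go sep rest 1 by
          simp [PySem.Chars.find, PySem.Chars.find.go, h']]
        exact findgo_shift sep hsep rest 1
      rw [splitOn_cons_npre sep hsep c rest h']
      by_cases hr : PySem.Chars.find rest sep = -1
      · rw [hf, if_pos hr, ih, if_pos hr]
        simp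
      · have h0 : 0 ≤ PySem.Chars.find rest sep := by
          have := PySem.Chars.neg_one_le_find rest sep; omega
        have hne : ¬ (1 + PySem.Chars.find rest sep = -1) := by omega
        rw [hf, if_neg hr, if_neg hne, ih, if_neg hr]
        have ht : (1 + PySem.Chars.find rest sep).toNat = (PySem.Chars.find rest sep).toNat + 1 := by
          omega
        rw [ht]
        simp only [List.take_succ_cons, List.modifyHead_cons]
        have harith : (PySem.Chars.find rest sep).toNat + 1 + sep.length
            = ((PySem.Chars.find rest sep).toNat + sep.length) + 1 := by omega
        rw [harith, List.drop_succ_cons]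

-- main lemma: A's scanning loop from byte offset k equals B's fold over the parts of s.drop k
theorem main_lemma (s sep : List Char) (hsep : sep ≠ []) :
    ∀ (n k : Nat) (acc : List (List (String × Int))) (fuel : Nat)
      (p0 : List Char) (rest : List (List Char)),
      k ≤ s.length → s.length - k ≤ n → s.length - k < fuel →
      PySem.Chars.splitOn (s.drop k) sep = p0 :: rest →
      aGo s sep fuel (k : Int) acc =
        (rest.foldl (bStep (sep.length : Int) (s.length : Int))
          ((k : Int) + (p0.length : Int), acc)).2 := by
  intro n
  induction n using Nat.strong_induction_on with
  | _ n ih =>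
    intro k acc fuel p0 rest hk hn hfuel hsplit
    cases fuel with
    | zero => omega
    | succ fuel =>
      rw [show aGo s sep (fuel+1) (k:Int) acc
          = (if PySem.Chars.findFrom s sep (k:Int) none < 0 then acc
             else aGo s sep fuel (PySem.Chars.findFrom s sep (k:Int) none + (sep.length:Int))
               (if PySem.Chars.findFrom s sep (k:Int) none + (sep.length:Int) < (s.length:Int)
                then acc ++ [[("position", PySem.Chars.findFrom s sep (k:Int) none + (sep.length:Int))]]
                else acc)) from rfl]
      rw [PySem.Chars.findFrom_natCast s sep k hk]
      by_cases hf : PySem.Chars.find (s.drop k) sep = -1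
      · rw [if_pos (by rw [if_pos hf]; omega)]
        rw [splitOn_step sep hsep _, if_pos hf] at hsplit
        obtain ⟨hp0, hrest⟩ : s.drop k = p0 ∧ rest = [] := by
          cases hsplit; exact ⟨rfl, rfl⟩
        subst hrest
        rfl
      · have h0 : 0 ≤ PySem.Chars.find (s.drop k) sep := by
          have := PySem.Chars.neg_one_le_find (s.drop k) sep; omega
        set f := PySem.Chars.find (s.drop k) sep with hfdef
        have hcast : ((f.toNat : Int)) = f := Int.toNat_of_nonneg h0
        have hprefix : sep <+: (s.drop k).drop f.toNat := (PySem.Chars.find_spec h0).1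
        have hfl : f.toNat < (s.drop k).length := by
          by_contra hge
          rw [List.drop_eq_nil_of_le (Nat.le_of_not_lt hge)] at hprefix
          exact hsep (List.prefix_nil.mp hprefix)
        have hdlen : (s.drop k).length = s.length - k := List.length_drop ..
        have hseple : f.toNat + sep.length ≤ s.length - k := by
          have h2 := hprefix.length_le
          rw [List.length_drop, List.length_drop] at h2
          omega
        set k' := k + f.toNat + sep.length with hk'def
        have hk'le : k' ≤ s.length := by omega
        have hslpos : 0 < sep.length := List.length_pos_of_ne_nil hsep
        rw [if_neg hf, if_neg (by omega)]
        rw [splitOn_step sep hsep _, if_neg hf, ← hfdef] at hsplit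
        have hdropdrop : ((s.drop k).drop (f.toNat + sep.length)) = s.drop k' := by
          rw [List.drop_drop]; congr 1; omega
        rw [hdropdrop] at hsplit
        obtain ⟨hp0, hrest⟩ : (s.drop k).take f.toNat = p0 ∧ rest = PySem.Chars.splitOn (s.drop k') sep := by
          cases hsplit; exact ⟨rfl, rfl⟩
        have hp0len : p0.length = f.toNat := by
          rw [← hp0, List.length_take]; omega
        cases heq : PySem.Chars.splitOn (s.drop k') sep with
        | nil => exact absurd heq (splitOn_ne_nil sep _)
        | cons p0' rest' =>
          have hposk' : (k:Int) + f + (sep.length:Int) = (k' : Int) := by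
            rw [← hcast]; omega
          rw [hposk']
          have hstep : aGo s sep fuel (k':Int)
                (if (k':Int) < (s.length:Int) then acc ++ [[("position", (k':Int))]] else acc)
              = (rest'.foldl (bStep (sep.length:Int) (s.length:Int))
                  ((k':Int) + (p0'.length:Int),
                   if (k':Int) < (s.length:Int) then acc ++ [[("position", (k':Int))]] else acc)).2 := by
            exact ih (s.length - k') (by omega) k' _ fuel p0' rest' hk'le (by omega) (by omega) heq
          have hinit : bStep (sep.length:Int) (s.length:Int) ((k:Int) + (p0.length:Int), acc) p0'
              = ((k':Int) + (p0'.length:Int),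
                 if (k':Int) < (s.length:Int) then acc ++ [[("position", (k':Int))]] else acc) := by
            simp only [bStep, hp0len]
            rw [show (k:Int) + (f.toNat:Int) + (sep.length:Int) = (k':Int) by omega]
          rw [hstep, hrest, heq, List.foldl_cons, hinit]

-- ===== VERDICT (by name: the statement is the Claim_ definition above) =====
theorem compute_split_points_spec : Claim_equal_compute_split_points := by
  intro content separator _ hpre
  unfold Spec_compute_split_points compute_split_points compute_split_points_alt
  have hsep : separator.toList ≠ [] := hpre
  rw [if_neg (by simpa [List.isEmpty_iff] using hsep)]
  rw [show PySem.Chars.split? content.toList separator.toList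
      = some (PySem.Chars.splitOn content.toList separator.toList) by
    simp [PySem.Chars.split?, List.isEmpty_iff, hsep]]
  cases heq : PySem.Chars.splitOn content.toList separator.toList with
  | nil => exact absurd heq (splitOn_ne_nil _ _)
  | cons p0 rest =>
    have := main_lemma content.toList separator.toList hsep content.toList.length 0 []
      (content.toList.length + 2) p0 rest (by omega) (by omega) (by omega)
      (by simpa using heq)
    simpa using this
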